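-- pv_equiv track=rewrite | github.com/nobiru/pmps_test | src/old/model_variables_relaxation.py | get_split_month_list
-- ===== SOURCE A (Python) =====
-- def get_split_month_list(months):
--     """
--     末の月から3か月ごと区切ったリストをかえす
--     クォーターごとの月が子リストになる
--
--     """
--     result = []
--     i = len(months)
--     while i > 0:
--         start = max(0, i - 3)
--         result.insert(0, months[start:i])
--         i -= 3
--     return result
-- ===== SOURCE B (Python) =====
-- def get_split_month_list(months):
--     r = len(months) % 3
--     result = []
--     if r != 0:
--         result.append(months[0:r])
--     for i in range(r, len(months), 3):
--         result.append(months[i:i+3])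
--     return result
-- ===== Notes on version B (the rewrite author's own statement) =====
-- stated objective: faster
-- what changed: Replaces A's backward countdown with result.insert(0, ...) (quadratic front-insertion) by computing r = len % 3 up front, emitting the short leading chunk once, then appending aligned 3-chunks in one forward pass.
import Mathlib
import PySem

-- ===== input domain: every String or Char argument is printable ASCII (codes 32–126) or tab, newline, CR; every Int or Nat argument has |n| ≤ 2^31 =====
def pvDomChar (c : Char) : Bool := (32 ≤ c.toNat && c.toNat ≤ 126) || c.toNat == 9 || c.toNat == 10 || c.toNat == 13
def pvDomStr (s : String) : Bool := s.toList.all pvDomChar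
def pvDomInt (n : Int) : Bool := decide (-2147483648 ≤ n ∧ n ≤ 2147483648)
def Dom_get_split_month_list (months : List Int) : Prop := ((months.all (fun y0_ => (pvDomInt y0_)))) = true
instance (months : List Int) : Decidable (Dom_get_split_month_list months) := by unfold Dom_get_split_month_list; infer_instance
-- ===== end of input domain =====

-- B replaces A's backward countdown with front-insertion by a forward, modulo-aligned
-- partition (leading short chunk from len % 3, then 3-chunks); objective: simpler.


-- ===== PORT A =====
-- while i > 0: result.insert(0, months[max(0, i-3):i]); i -= 3    (i starts at len(months) ≥ 0,
-- so it is carried as a Nat; Nat subtraction stops at 0 exactly where Python's loop guard stops)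
def pvALoop (months : List Int) (i : Nat) (acc : List (List Int)) : List (List Int) :=
  if i = 0 then acc
  else pvALoop months (i - 3)
        (PySem.List.slice months (some (max 0 ((i : Int) - 3))) (some (i : Int)) :: acc)
  termination_by i
  decreasing_by omega

def get_split_month_list (months : List Int) : List (List Int) :=
  pvALoop months months.length []

-- ===== PORT B =====
def get_split_month_list_alt (months : List Int) : List (List Int) :=
  let r : Int := PySem.Int.mod (months.length : Int) 3
  let result : List (List Int) :=
    if r ≠ 0 then [PySem.List.slice months (some 0) (some r)] else []
  (PySem.List.pyRange r (months.length : Int) 3).foldl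
    (fun acc i => acc ++ [PySem.List.slice months (some i) (some (i + 3))]) result

-- ===== PRECONDITION & SPEC =====
def Spec_get_split_month_list (months : List Int) (out : List (List Int)) : Prop := out = get_split_month_list_alt months
instance (months : List Int) (out : List (List Int)) : Decidable (Spec_get_split_month_list months out) := by unfold Spec_get_split_month_list; infer_instance

-- ===== CLAIM (what is proved, stated in full; the proofs are below) =====
def Claim_equal_get_split_month_list : Prop := ∀ (months : List Int), Dom_get_split_month_list months → Spec_get_split_month_list months (get_split_month_list months)

-- ===== LEMMAS AND PROOFS =====

-- range(r, r+3k, 3) enumerates r + 3*j for j < k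
lemma pvRange_three (r k : Nat) :
    PySem.List.pyRange (r : Int) ((r : Int) + 3 * (k : Int)) 3
      = (List.range k).map (fun j : Nat => (r : Int) + 3 * (j : Int)) := by
  rw [PySem.List.pyRange_of_pos _ _ (by norm_num)]
  have hcount : (if (r : Int) < (r : Int) + 3 * (k : Int) then
      (((r : Int) + 3 * (k : Int) - (r : Int) + 3 - 1) / 3).toNat else 0) = k := by
    split_ifs with h <;> omega
  rw [hcount]

-- A's countdown loop with front-insertion, characterised forwards
lemma pvALoop_eq (months : List Int) :
    ∀ (k r : Nat) (acc : List (List Int)), r < 3 →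
      pvALoop months (r + 3 * k) acc
        = (if r = 0 then [] else [PySem.List.slice months (some 0) (some (r : Int))])
          ++ ((List.range k).map
                (fun j : Nat => PySem.List.slice months (some ((r : Int) + 3 * (j : Int)))
                          (some ((r : Int) + 3 * (j : Int) + 3))) ++ acc) := by
  intro k
  induction k with
  | zero =>
    intro r acc hr
    simp only [Nat.mul_zero, Nat.add_zero, List.range_zero, List.map_nil, List.nil_append]
    rcases Nat.eq_zero_or_pos r with h0 | h0
    · subst h0; rw [pvALoop]; simp
    · rw [pvALoop, if_neg (by omega)]
      have hsub : r - 3 = 0 := by omega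
      have hmax : max 0 ((r : Int) - 3) = 0 := max_eq_left (by omega)
      rw [hmax, hsub, pvALoop, if_pos rfl]
      simp [Nat.pos_iff_ne_zero.mp h0]
  | succ k ih =>
    intro r acc hr
    have hne : r + 3 * (k + 1) ≠ 0 := by omega
    rw [pvALoop, if_neg hne]
    have hsub : r + 3 * (k + 1) - 3 = r + 3 * k := by omega
    have hmax : max 0 (((r + 3 * (k + 1) : Nat) : Int) - 3) = ((r + 3 * k : Nat) : Int) := by
      push_cast; omega
    rw [hmax, hsub, ih r _ hr, List.range_succ, List.map_append]
    have h1 : ((r + 3 * k : Nat) : Int) = (r : Int) + 3 * (k : Int) := by push_cast; ring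
    have h2 : ((r + 3 * (k + 1) : Nat) : Int) = (r : Int) + 3 * (k : Int) + 3 := by push_cast; ring
    rw [h1, h2]
    simp

-- ===== VERDICT (by name: the statement is the Claim_ definition above) =====
theorem get_split_month_list_spec : Claim_equal_get_split_month_list := by
  intro months _
  simp only [Spec_get_split_month_list, get_split_month_list, get_split_month_list_alt]
  set n := months.length with hn
  have hmod : PySem.Int.mod (n : Int) 3 = ((n % 3 : Nat) : Int) := by
    simp [PySem.Int.mod, Int.fmod_eq_emod]
  have hr3 := pvRange_three (n % 3) (n / 3)
  rw [show ((n % 3 : Nat) : Int) + 3 * ((n / 3 : Nat) : Int) = (n : Int) from by push_cast; omega] at hr3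
  have hA := pvALoop_eq months (n / 3) (n % 3) [] (Nat.mod_lt _ (by norm_num))
  rw [show n % 3 + 3 * (n / 3) = n from by omega] at hA
  rw [hmod, hr3, hA, PySem.List.foldl_append_singleton_eq_map, List.map_map]
  by_cases h : n % 3 = 0
  · simp [h]
  · have hdvd : ¬ (3 : Int) ∣ (n : Int) := by omega
    simp [h, hdvd]
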